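-- pv_equiv track=rewrite | github.com/kevng2/Nickelodeon-Chess | board.py | getRectPoints
-- ===== SOURCE A (Python) =====
-- def getRectPoints(dest):
--     # if the click is out of the bounds of the board
--     if dest[0] < 300 or dest[0] > 940 or dest[1] < 200 or dest[1] > 840:
--         return (dest[0], dest[1])
--
--     # Coordinates of where the white and orange squares were drawn
--     cornerPointsX = [860, 780, 700, 620, 540, 460, 380, 300]
--     cornerPointsY = [760, 680, 600, 520, 440, 360, 280, 200]
--
--     xPoint = dest[0]
--     yPoint = dest[1]
--
--     # loop through each value in the list to find which
--     # square the click was in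
--     for x in cornerPointsX:
--         if xPoint > x:
--             xPoint = x
--             break
--
--     for y in cornerPointsY:
--         if yPoint > y:
--             yPoint = y
--             break
--
--     return (xPoint, yPoint)
-- ===== SOURCE B (Python) =====
-- def getRectPoints(dest):
--     x, y = dest
--     if x < 300 or x > 940 or y < 200 or y > 840:
--         return (x, y)
--     xSnap = x if x <= 300 else 300 + 80 * ((x - 301) // 80)
--     ySnap = y if y <= 200 else 200 + 80 * ((y - 201) // 80)
--     return (xSnap, ySnap)
-- ===== Notes on version B (the rewrite author's own statement) =====
-- stated objective: idiomatic
-- what changed: Replaces the two linear scans over hard-coded corner lists with closed-form floor-division arithmetic on the regular 80-pixel grid.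
import Mathlib
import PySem

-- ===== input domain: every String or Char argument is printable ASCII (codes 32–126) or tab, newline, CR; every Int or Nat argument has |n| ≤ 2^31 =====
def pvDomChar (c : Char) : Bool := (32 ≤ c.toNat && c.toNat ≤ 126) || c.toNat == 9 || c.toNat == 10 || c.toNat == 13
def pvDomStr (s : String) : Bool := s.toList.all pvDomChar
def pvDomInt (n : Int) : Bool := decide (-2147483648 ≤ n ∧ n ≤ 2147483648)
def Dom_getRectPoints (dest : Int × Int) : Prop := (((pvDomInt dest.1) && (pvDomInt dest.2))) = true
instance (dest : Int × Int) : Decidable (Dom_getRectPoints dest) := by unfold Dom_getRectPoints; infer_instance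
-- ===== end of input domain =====

-- B replaces A's linear scans over the hard-coded corner lists with closed-form
-- floor-division arithmetic on the regular 80-pixel grid (idiomatic; same O(1) cost).


-- ===== PORT A =====
-- for-loop with break: scan the corner list, snap to the first corner strictly below p
def pvSnapScan (corners : List Int) (p : Int) : Int :=
  match corners with
  | [] => p
  | c :: rest => if p > c then c else pvSnapScan rest p

def getRectPoints (dest : Int × Int) : Int × Int :=
  if dest.1 < 300 ∨ dest.1 > 940 ∨ dest.2 < 200 ∨ dest.2 > 840 then (dest.1, dest.2)
  else
    let cornerPointsX : List Int := [860, 780, 700, 620, 540, 460, 380, 300]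
    let cornerPointsY : List Int := [760, 680, 600, 520, 440, 360, 280, 200]
    let xPoint := pvSnapScan cornerPointsX dest.1
    let yPoint := pvSnapScan cornerPointsY dest.2
    (xPoint, yPoint)

-- ===== PORT B =====
def getRectPoints_alt (dest : Int × Int) : Int × Int :=
  let x := dest.1
  let y := dest.2
  if x < 300 ∨ x > 940 ∨ y < 200 ∨ y > 840 then (x, y)
  else
    let xSnap := if x ≤ 300 then x else 300 + 80 * PySem.Int.floordiv (x - 301) 80
    let ySnap := if y ≤ 200 then y else 200 + 80 * PySem.Int.floordiv (y - 201) 80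
    (xSnap, ySnap)

-- ===== PRECONDITION & SPEC =====
def Spec_getRectPoints (dest : Int × Int) (out : Int × Int) : Prop := out = getRectPoints_alt dest
instance (dest : Int × Int) (out : Int × Int) : Decidable (Spec_getRectPoints dest out) := by unfold Spec_getRectPoints; infer_instance

-- ===== CLAIM (what is proved, stated in full; the proofs are below) =====
def Claim_equal_getRectPoints : Prop := ∀ (dest : Int × Int), Dom_getRectPoints dest → Spec_getRectPoints dest (getRectPoints dest)

-- ===== LEMMAS AND PROOFS =====
theorem pvSnap_closed (base p : Int) (hlo : base ≤ p) (hhi : p ≤ base + 640) :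
    pvSnapScan [base + 560, base + 480, base + 400, base + 320, base + 240,
                base + 160, base + 80, base] p
      = if p ≤ base then p else base + 80 * PySem.Int.floordiv (p - (base + 1)) 80 := by
  rw [PySem.Int.floordiv_eq_ediv_of_pos (by omega)]
  simp only [pvSnapScan]
  split_ifs <;> omega

-- ===== VERDICT (by name: the statement is the Claim_ definition above) =====
theorem getRectPoints_spec : Claim_equal_getRectPoints := by
  intro ⟨x, y⟩ _
  show getRectPoints (x, y) = getRectPoints_alt (x, y)
  unfold getRectPoints getRectPoints_alt
  by_cases h : x < 300 ∨ x > 940 ∨ y < 200 ∨ y > 840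
  · simp [h]
  · simp only [if_neg h]
    push Not at h
    have hx := pvSnap_closed 300 x (by omega) (by omega)
    have hy := pvSnap_closed 200 y (by omega) (by omega)
    norm_num at hx hy
    rw [hx, hy, PySem.Int.floordiv_eq_ediv_of_pos (by omega), PySem.Int.floordiv_eq_ediv_of_pos (by omega)]
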